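-- pv_equiv track=rewrite | github.com/WoobeenJeong/Rosalind | TextBook/BA3/ba3h.py | into_string
-- ===== SOURCE A (Python) =====
-- def count_overlap(prefix, suffix):
--     overlap_length = 0
--     for i in range(1, min(len(prefix), len(suffix))):
--         if prefix.endswith(suffix[:i]):
--             overlap_length = i
--     return overlap_length
--
-- def into_string(path):
--     result_sentence = path[0]
--
--     for i in range(1, len(path)):
--         current_word = path[i]
--         previous_word = path[i - 1]
--         overlap = count_overlap(previous_word, current_word)
--         result_sentence += current_word[overlap:]
--
--     return result_sentence
-- ===== SOURCE B (Python) =====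
-- def into_string(path):
--     # KMP prefix function of cur + '\x00' + prev gives the longest suffix/prefix
--     # overlap of each adjacent pair in one scan (capped below min length as A's range does).
--     def _pi_overlap(prev, cur):
--         t = cur + '\x00' + prev
--         pi = [0]
--         k = 0
--         for i in range(1, len(t)):
--             while k and t[i] != t[k]:
--                 k = pi[k - 1]
--             if t[i] == t[k]:
--                 k += 1
--             pi.append(k)
--         m = min(len(prev), len(cur))
--         if k == m and k:
--             k = pi[k - 1]
--         return k
--     pieces = [path[0]]
--     for prev, cur in zip(path, path[1:]):
--         pieces.append(cur[_pi_overlap(prev, cur):])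
--     return ''.join(pieces)
-- ===== Notes on version B (the rewrite author's own statement) =====
-- stated objective: alternative
-- what changed: B computes each adjacent overlap with the KMP prefix function of cur + '\x00' + prev (one scan per pair, then one border step to cap the overlap below the min length) instead of A's scan over every candidate length with an endswith test per length, and assembles the result by joining the word tails instead of repeated concatenation.
import Mathlib
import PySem

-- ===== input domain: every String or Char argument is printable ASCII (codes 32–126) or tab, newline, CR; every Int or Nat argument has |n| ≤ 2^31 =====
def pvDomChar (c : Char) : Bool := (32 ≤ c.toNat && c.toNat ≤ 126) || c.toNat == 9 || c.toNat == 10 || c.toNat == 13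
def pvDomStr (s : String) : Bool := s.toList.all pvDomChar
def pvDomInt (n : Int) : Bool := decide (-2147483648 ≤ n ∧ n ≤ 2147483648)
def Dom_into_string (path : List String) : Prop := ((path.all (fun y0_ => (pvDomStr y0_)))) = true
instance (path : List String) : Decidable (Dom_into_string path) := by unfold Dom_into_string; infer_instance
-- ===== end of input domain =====

-- B computes each pair's longest suffix/prefix overlap with the KMP prefix function of
-- cur + '\x00' + prev instead of A's per-length endswith probes, and assembles the result
-- by joining the word tails; objective: alternative (a genuinely different algorithm).

-- ===== PORT A =====
def count_overlap (pfx sfx : String) : Int :=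
  (PySem.List.pyRange 1 (min (PySem.Str.len pfx) (PySem.Str.len sfx))).foldl
    (fun o i => if PySem.Str.endswith pfx (PySem.Str.slice sfx none (some i)) then i else o) 0

def into_string (path : List String) : String :=
  match PySem.List.pyGet? path 0 with
  | none => ""   -- Python raises IndexError here; excluded by Pre_into_string
  | some first =>
      (PySem.List.pyRange 1 (path.length : Int)).foldl
        (fun res i =>
          match PySem.List.pyGet? path i, PySem.List.pyGet? path (i - 1) with
          | some cur, some prev =>
              res ++ PySem.Str.slice cur (some (count_overlap prev cur)) none
          | _, _ => res)   -- unreachable: indices from range(1, len(path)) are valid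
        first

-- ===== PORT B =====
-- while k and t[i] != t[k]: k = pi[k-1].  The 'min … K' is only a totality guard:
-- on every actual run pi.getD K 0 ≤ K (proved below), so it is Python's pi[k-1].
def kmpFall (t : List Char) (pi : List Nat) (c : Char) : Nat → Nat
  | 0 => 0
  | K + 1 =>
      if t.getD (K + 1) '\x00' = c then K + 1
      else kmpFall t pi c (min (pi.getD K 0) K)
termination_by k => k
decreasing_by exact Nat.lt_succ_of_le (Nat.min_le_right _ _)

-- the tail of one KMP iteration: if t[i] == t[k]: k += 1
def kmpStep (t : List Char) (pi : List Nat) (k : Nat) (c : Char) : Nat :=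
  let k2 := kmpFall t pi c k
  if t.getD k2 '\x00' = c then k2 + 1 else k2

-- pi = [0]; k = 0; for i in range(1, len(t)): … ; pi.append(k)
def buildPi (t : List Char) : List Nat × Nat :=
  (List.range' 1 (t.length - 1)).foldl
    (fun st i =>
      let k := kmpStep t st.1 st.2 (t.getD i '\x00')
      (st.1 ++ [k], k))
    ([0], 0)

-- t = cur + '\x00' + prev; prefix function; m = min(len(prev), len(cur));
-- if k == m and k: k = pi[k - 1]
def piOverlap (prev cur : String) : Nat :=
  let t := cur.toList ++ '\x00' :: prev.toList
  let pk := buildPi t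
  let m := min prev.toList.length cur.toList.length
  if pk.2 = m ∧ pk.2 ≠ 0 then pk.1.getD (pk.2 - 1) 0 else pk.2

def into_string_alt (path : List String) : String :=
  match path with
  | [] => ""   -- Python raises IndexError here; excluded by Pre_into_string
  | p :: rest =>
      PySem.Str.join ""
        (p :: (path.zip rest).map (fun pc =>
          PySem.Str.slice pc.2 (some ((piOverlap pc.1 pc.2 : Nat) : Int)) none))

-- ===== PRECONDITION & SPEC =====
-- Pre_ excludes only the empty list, on which A raises IndexError (path[0]).
def Pre_into_string (path : List String) : Prop := path ≠ []
instance (path : List String) : Decidable (Pre_into_string path) := by unfold Pre_into_string; infer_instance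
def pvWitness_into_string : List String := ["GGC", "GCA", "CAT"]

def Spec_into_string (path : List String) (out : String) : Prop := out = into_string_alt path
instance (path : List String) (out : String) : Decidable (Spec_into_string path out) := by unfold Spec_into_string; infer_instance

-- ===== CLAIM (what is proved, stated in full; the proofs are below) =====
def Claim_equal_into_string : Prop := ∀ (path : List String), Dom_into_string path → Pre_into_string path → Spec_into_string path (into_string path)

-- ===== LEMMAS AND PROOFS =====

-- longest proper border (longest j < |s| with s.take j a suffix of s); 0 if none
def mB (s : List Char) : Nat :=
  Nat.findGreatest (fun j => s.take j <:+ s) (s.length - 1)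

-- ---- generic Nat.findGreatest plumbing ----
lemma findGreatest_congr (P Q : Nat → Prop) [DecidablePred P] [DecidablePred Q] (n : Nat)
    (h : ∀ j, j ≤ n → (P j ↔ Q j)) : Nat.findGreatest P n = Nat.findGreatest Q n := by
  induction n with
  | zero => rfl
  | succ n ih =>
    rw [Nat.findGreatest_succ, Nat.findGreatest_succ,
      ih (fun j hj => h j (Nat.le_succ_of_le hj))]
    by_cases hp : P (n + 1)
    · rw [if_pos hp, if_pos ((h (n+1) le_rfl).mp hp)]
    · rw [if_neg hp, if_neg (fun hq => hp ((h (n+1) le_rfl).mpr hq))]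

lemma findGreatest_shrink (P : Nat → Prop) [DecidablePred P] (m n : Nat)
    (hmn : m ≤ n) (h : ∀ j, P j → j ≤ m) :
    Nat.findGreatest P n = Nat.findGreatest P m := by
  induction n with
  | zero => have : m = 0 := by omega
            rw [this]
  | succ n ih =>
    rcases Nat.eq_or_lt_of_le hmn with he | hl
    · rw [he]
    · have hm : m ≤ n := by omega
      rw [Nat.findGreatest_succ, if_neg (fun hp => by have := h _ hp; omega), ih hm]

-- ---- suffix basics ----
lemma suffix_of_suffix_le {u v s : List Char} (hu : u <:+ s) (hv : v <:+ s)
    (h : u.length ≤ v.length) : u <:+ v := by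
  rw [← List.reverse_prefix] at hu hv ⊢
  exact List.prefix_of_prefix_length_le hu hv (by simpa using h)

lemma take_suffix_iff_drop {s : List Char} {j : Nat} (hj : j ≤ s.length) :
    (s.take j <:+ s ↔ s.drop (s.length - j) = s.take j) := by
  constructor
  · intro h
    obtain ⟨w, hw⟩ := h
    have hl : s.length - j = w.length := by
      have := congrArg List.length hw; simp at this; omega
    rw [hl]
    conv_lhs => rw [← hw]
    rw [List.drop_left]
  · intro h
    exact ⟨s.take (s.length - j), by rw [← h]; exact List.take_append_drop _ _⟩

-- nesting: below a border m of s, borders of s are exactly borders of s.take m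
lemma borders_nest {s : List Char} {m j : Nat} (hm : s.take m <:+ s) (hj : j ≤ m)
    (hms : m ≤ s.length) :
    (s.take j <:+ s ↔ s.take j <:+ s.take m) := by
  constructor
  · intro h
    exact suffix_of_suffix_le h hm
      (by rw [List.length_take, List.length_take]; omega)
  · intro h
    exact h.trans hm

lemma mB_le (s : List Char) : mB s ≤ s.length - 1 := Nat.findGreatest_le _

lemma mB_suffix (s : List Char) : s.take (mB s) <:+ s := by
  rcases Nat.eq_zero_or_pos (mB s) with h | h
  · rw [h]; simp
  · exact (Nat.findGreatest_eq_iff.1 (rfl : mB s = mB s)).2.1 h.ne'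

lemma mB_greatest {s : List Char} {j : Nat} (h1 : mB s < j) (h2 : j ≤ s.length - 1) :
    ¬ (s.take j <:+ s) :=
  Nat.findGreatest_is_greatest (P := fun j => s.take j <:+ s) h1 h2

-- border extension: j+1 is a border of s ++ [c] iff j is a border of s ending before c
lemma border_ext {s : List Char} {c : Char} {j : Nat} (hj : j < s.length) :
    ((s ++ [c]).take (j + 1) <:+ (s ++ [c])) ↔
      (s.take j <:+ s ∧ s.getD j '\x00' = c) := by
  have hgd : s.getD j '\x00' = s[j] := List.getD_eq_getElem s _ hj
  have htake : (s ++ [c]).take (j + 1) = s.take j ++ [s[j]] := by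
    rw [List.take_append_of_le_length (by omega), List.take_succ,
      List.getElem?_eq_getElem hj]
    rfl
  have hlen : (s ++ [c]).length - (j + 1) = s.length - j := by simp
  rw [take_suffix_iff_drop (by simp; omega), htake, hlen,
    List.drop_append_of_le_length (by omega)]
  constructor
  · intro h
    obtain ⟨h1, h2⟩ := List.append_inj' h rfl
    refine ⟨(take_suffix_iff_drop (by omega)).mpr h1, ?_⟩
    rw [hgd]
    exact (List.singleton_inj.mp h2).symm
  · rintro ⟨hsuf, hc⟩
    rw [(take_suffix_iff_drop (by omega)).mp hsuf, hgd.symm, hc]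

-- ---- fall correctness ----
lemma kmpFall_spec (t : List Char) (pi : List Nat) (i : Nat) (c : Char)
    (hi : i + 1 ≤ t.length)
    (hpi : ∀ j, j ≤ i → pi.getD j 0 = mB (t.take (j + 1))) :
    ∀ K, K ≤ i → (t.take (i+1)).take K <:+ t.take (i+1) →
      kmpFall t pi c K ≤ K ∧
      (t.take (i+1)).take (kmpFall t pi c K) <:+ t.take (i+1) ∧
      (kmpFall t pi c K = 0 ∨ t.getD (kmpFall t pi c K) '\x00' = c) ∧
      (∀ j, kmpFall t pi c K < j → j ≤ K →
        (t.take (i+1)).take j <:+ t.take (i+1) → t.getD j '\x00' ≠ c) := by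
  have hslen : (t.take (i+1)).length = i + 1 := by
    rw [List.length_take]; omega
  have hTT : ∀ m, m ≤ i + 1 → (t.take (i+1)).take m = t.take m := by
    intro m hm
    rw [List.take_take, Nat.min_eq_left hm]
  intro K
  induction K using Nat.strong_induction_on with
  | _ K IH =>
    intro hK hsuf
    cases K with
    | zero =>
      simp only [kmpFall]
      refine ⟨le_refl 0, by simp, Or.inl trivial, ?_⟩
      intro j h1 h2
      omega
    | succ K' =>
      rw [kmpFall]
      by_cases hm : t.getD (K' + 1) '\x00' = c
      · rw [if_pos hm]
        exact ⟨le_refl _, hsuf, Or.inr hm, fun j h1 h2 _ _ => by omega⟩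
      · rw [if_neg hm]
        have hK' : K' ≤ i := by omega
        have hpiK : pi.getD K' 0 = mB (t.take (K' + 1)) := hpi K' hK'
        have hlenK : (t.take (K' + 1)).length = K' + 1 := by
          rw [List.length_take]; omega
        have hK2le : mB (t.take (K' + 1)) ≤ K' := by
          have := mB_le (t.take (K' + 1)); omega
        have hmin : min (pi.getD K' 0) K' = mB (t.take (K' + 1)) := by
          rw [hpiK]; exact Nat.min_eq_left hK2le
        rw [hmin]
        have hsuf' : t.take (K' + 1) <:+ t.take (i+1) := by
          rw [← hTT (K' + 1) (by omega)]; exact hsuf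
        have hsufK2 : (t.take (i+1)).take (mB (t.take (K' + 1))) <:+ t.take (i+1) := by
          rw [hTT _ (by omega)]
          have h1 : (t.take (K'+1)).take (mB (t.take (K' + 1))) <:+ t.take (K'+1) :=
            mB_suffix _
          rw [List.take_take, Nat.min_eq_left (by omega)] at h1
          exact h1.trans hsuf'
        obtain ⟨r_le, r_suf, r_eq, r_max⟩ :=
          IH (mB (t.take (K' + 1))) (by omega) (by omega) hsufK2
        refine ⟨by omega, r_suf, r_eq, ?_⟩
        intro j h1 h2 hbord
        rcases Nat.lt_or_ge (mB (t.take (K' + 1))) j with hgt | hle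
        · rcases Nat.eq_or_lt_of_le h2 with he | hl
          · cases he; exact hm
          · -- mB (t.take (K'+1)) < j ≤ K': j would be a larger border of t.take (K'+1)
            exfalso
            have hb : (t.take (i+1)).take j <:+ (t.take (i+1)).take (K' + 1) :=
              (borders_nest hsuf (by omega) (by omega)).mp hbord
            rw [hTT j (by omega), hTT (K' + 1) (by omega)] at hb
            have hb' : (t.take (K' + 1)).take j <:+ t.take (K' + 1) := by
              rw [List.take_take, Nat.min_eq_left (by omega)]
              exact hb
            exact mB_greatest hgt (by omega) hb'
        · exact r_max j h1 hle hbord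

lemma kmpStep_mB (t : List Char) (pi : List Nat) (i : Nat)
    (hi : i + 1 < t.length)
    (hpi : ∀ j, j ≤ i → pi.getD j 0 = mB (t.take (j + 1))) :
    kmpStep t pi (mB (t.take (i + 1))) (t.getD (i + 1) '\x00') = mB (t.take (i + 2)) := by
  have hslen : (t.take (i+1)).length = i + 1 := by
    rw [List.length_take]; omega
  have hgd : ∀ m, m ≤ i → (t.take (i+1)).getD m '\x00' = t.getD m '\x00' := by
    intro m hm
    rw [List.getD_eq_getElem?_getD, List.getD_eq_getElem?_getD,
      List.getElem?_take_of_lt (by omega)]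
  have hK0le : mB (t.take (i+1)) ≤ i := by
    have := mB_le (t.take (i+1)); omega
  obtain ⟨r_le, r_suf, r_eq, r_max⟩ :=
    kmpFall_spec t pi i (t.getD (i + 1) '\x00') (by omega) hpi
      (mB (t.take (i+1))) hK0le (mB_suffix _)
  have hext : t.take (i+2) = t.take (i+1) ++ [t.getD (i+1) '\x00'] := by
    rw [show i+2 = (i+1)+1 from rfl, List.take_add_one, List.getElem?_eq_getElem hi,
      List.getD_eq_getElem t _ hi]
    rfl
  have hlen2 : (t.take (i+2)).length - 1 = i + 1 := by
    rw [List.length_take]; omega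
  have hPiff : ∀ j, j ≤ i →
      ((t.take (i+2)).take (j+1) <:+ t.take (i+2) ↔
        ((t.take (i+1)).take j <:+ t.take (i+1) ∧ t.getD j '\x00' = t.getD (i+1) '\x00')) := by
    intro j hj
    rw [hext, border_ext (by omega), hgd j hj]
  -- every border of t.take (i+2) of length j+1 has j ≤ mB (t.take (i+1))
  have hbound : ∀ j, j ≤ i → (t.take (i+1)).take j <:+ t.take (i+1) →
      j ≤ mB (t.take (i+1)) := by
    intro j hj hb
    by_contra hcon
    exact mB_greatest (by omega) (by omega) hb
  simp only [kmpStep]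
  by_cases hif : t.getD (kmpFall t pi (t.getD (i + 1) '\x00') (mB (t.take (i + 1)))) '\x00'
      = t.getD (i + 1) '\x00'
  · rw [if_pos hif]
    symm
    rw [show mB (t.take (i+2)) = Nat.findGreatest
        (fun j => (t.take (i+2)).take j <:+ t.take (i+2)) (i+1) by unfold mB; rw [hlen2]]
    apply Nat.findGreatest_eq_iff.mpr
    refine ⟨by omega, fun _ => ?_, ?_⟩
    · exact (hPiff _ (by omega)).mpr ⟨r_suf, hif⟩
    · intro n hn1 hn2 hP
      obtain ⟨j, rfl⟩ : ∃ j, n = j + 1 := ⟨n - 1, by omega⟩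
      obtain ⟨hb, he⟩ := (hPiff j (by omega)).mp hP
      exact r_max j (by omega) (hbound j (by omega) hb) hb he
  · rw [if_neg hif]
    have hr0 : kmpFall t pi (t.getD (i + 1) '\x00') (mB (t.take (i + 1))) = 0 := by
      rcases r_eq with h | h
      · exact h
      · exact absurd h hif
    rw [hr0]
    symm
    rw [show mB (t.take (i+2)) = Nat.findGreatest
        (fun j => (t.take (i+2)).take j <:+ t.take (i+2)) (i+1) by unfold mB; rw [hlen2]]
    apply Nat.findGreatest_eq_zero_iff.mpr
    intro n hn1 hn2 hP
    obtain ⟨j, rfl⟩ : ∃ j, n = j + 1 := ⟨n - 1, by omega⟩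
    obtain ⟨hb, he⟩ := (hPiff j (by omega)).mp hP
    rcases Nat.eq_zero_or_pos j with hj0 | hjpos
    · subst hj0
      rw [hr0] at hif
      exact hif he
    · rw [hr0] at r_max
      exact r_max j (by omega) (hbound j (by omega) hb) hb he

lemma buildPi_partial (t : List Char) : ∀ m, m + 1 ≤ t.length →
    ((List.range' 1 m).foldl
      (fun st i =>
        let k := kmpStep t st.1 st.2 (t.getD i '\x00')
        (st.1 ++ [k], k))
      (([0], 0) : List Nat × Nat)).1.length = m + 1 ∧
    ((List.range' 1 m).foldl
      (fun st i =>
        let k := kmpStep t st.1 st.2 (t.getD i '\x00')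
        (st.1 ++ [k], k))
      (([0], 0) : List Nat × Nat)).2 = mB (t.take (m + 1)) ∧
    (∀ j, j ≤ m →
      ((List.range' 1 m).foldl
        (fun st i =>
          let k := kmpStep t st.1 st.2 (t.getD i '\x00')
          (st.1 ++ [k], k))
        (([0], 0) : List Nat × Nat)).1.getD j 0 = mB (t.take (j + 1))) := by
  intro m
  induction m with
  | zero =>
    intro h
    have h1 : mB (t.take 1) = 0 := by
      unfold mB
      rw [show (t.take 1).length - 1 = 0 by rw [List.length_take]; omega]
      exact Nat.findGreatest_zero
    refine ⟨rfl, by simpa using h1.symm, ?_⟩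
    intro j hj
    have : j = 0 := by omega
    subst this
    simpa using h1.symm
  | succ m ih =>
    intro h
    obtain ⟨ih1, ih2, ih3⟩ := ih (by omega)
    set ST := (List.range' 1 m).foldl
      (fun st i =>
        let k := kmpStep t st.1 st.2 (t.getD i '\x00')
        (st.1 ++ [k], k))
      (([0], 0) : List Nat × Nat) with hST
    rw [List.range'_1_concat, List.foldl_append, List.foldl_cons, List.foldl_nil,
      show (1 + m) = m + 1 by omega]
    have hk : kmpStep t ST.1 ST.2 (t.getD (m + 1) '\x00') = mB (t.take (m + 2)) := by
      rw [ih2]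
      exact kmpStep_mB t ST.1 m (by omega) ih3
    refine ⟨?_, ?_, ?_⟩
    · show (ST.1 ++ [kmpStep t ST.1 ST.2 (t.getD (m + 1) '\x00')]).length = m + 1 + 1
      rw [List.length_append, ih1]
      rfl
    · show kmpStep t ST.1 ST.2 (t.getD (m + 1) '\x00') = mB (t.take (m + 1 + 1))
      exact hk
    · intro j hj
      show (ST.1 ++ [kmpStep t ST.1 ST.2 (t.getD (m + 1) '\x00')]).getD j 0
          = mB (t.take (j + 1))
      rcases Nat.lt_or_ge j (m + 1) with hlt | hge
      · rw [List.getD_append _ _ _ _ (by omega : j < ST.1.length)]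
        exact ih3 j (by omega)
      · have hj' : j = m + 1 := by omega
        subst hj'
        rw [List.getD_append_right _ _ _ _ (by omega : ST.1.length ≤ m + 1), ih1]
        simpa using hk

lemma buildPi_spec (t : List Char) (ht : 1 ≤ t.length) :
    (buildPi t).2 = mB t ∧
    ∀ j, j + 1 ≤ t.length → (buildPi t).1.getD j 0 = mB (t.take (j + 1)) := by
  obtain ⟨h1, h2, h3⟩ := buildPi_partial t (t.length - 1) (by omega)
  unfold buildPi
  refine ⟨?_, fun j hj => h3 j (by omega)⟩
  rw [h2, show t.length - 1 + 1 = t.length by omega, List.take_length]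

-- ---- separator characterisation ----
lemma sep_free_of_dom {s : String} (h : pvDomStr s = true) : '\x00' ∉ s.toList := by
  intro hm
  have := (List.all_eq_true.mp h) _ hm
  simp [pvDomChar] at this

lemma border_char_sep (a b : List Char) (ha : '\x00' ∉ a) (hb : '\x00' ∉ b) :
    ∀ j, j ≤ (b ++ '\x00' :: a).length - 1 →
      ((b ++ '\x00' :: a).take j <:+ (b ++ '\x00' :: a) ↔
        (j ≤ min a.length b.length ∧ b.take j <:+ a)) := by
  intro j hj
  set t := b ++ '\x00' :: a with ht
  have hlen : t.length = b.length + a.length + 1 := by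
    rw [ht, List.length_append, List.length_cons]
    omega
  rw [hlen] at hj
  have hsepAt : ∀ i, i < t.length → (t[i]? = some '\x00' ↔ i = b.length) := by
    intro i hi
    constructor
    · intro h
      by_contra hne
      rcases Nat.lt_or_ge i b.length with hlt | hge
      · rw [ht, List.getElem?_append_left hlt] at h
        exact hb (List.mem_of_getElem? h)
      · rw [ht, List.getElem?_append_right hge] at h
        rw [show i - b.length = (i - b.length - 1) + 1 by omega] at h
        simp only [List.getElem?_cons_succ] at h
        exact ha (List.mem_of_getElem? h)
    · intro h
      subst h
      rw [ht, List.getElem?_append_right (le_refl _)]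
      simp
  constructor
  · intro hsuf
    have hdrop : t.drop (t.length - j) = t.take j :=
      (take_suffix_iff_drop (by omega)).mp hsuf
    have hjb : j ≤ b.length := by
      by_contra hcon
      have h1 : (t.take j)[b.length]? = t[b.length]? := List.getElem?_take_of_lt (by omega)
      have h2 : (t.drop (t.length - j))[b.length]? = t[(t.length - j) + b.length]? := by
        rw [List.getElem?_drop]
      have hbsep : t[b.length]? = some '\x00' := (hsepAt b.length (by omega)).mpr rfl
      have hx : t[(t.length - j) + b.length]? = some '\x00' := by
        rw [← h2, hdrop, h1, hbsep]
      have := (hsepAt _ (by omega)).mp hx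
      omega
    have hja : j ≤ a.length := by
      by_contra hcon
      have hp1 : (t.take j)[j - a.length - 1]? = t[j - a.length - 1]? :=
        List.getElem?_take_of_lt (by omega)
      have hp2 : (t.drop (t.length - j))[j - a.length - 1]?
          = t[(t.length - j) + (j - a.length - 1)]? := by
        rw [List.getElem?_drop]
      have hidx : (t.length - j) + (j - a.length - 1) = b.length := by omega
      have hbsep : t[b.length]? = some '\x00' := (hsepAt b.length (by omega)).mpr rfl
      have hps : t[j - a.length - 1]? = some '\x00' := by
        rw [← hp1, ← hdrop, hp2, hidx, hbsep]
      have := (hsepAt _ (by omega)).mp hps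
      omega
    have htake : t.take j = b.take j := by
      rw [ht, List.take_append_of_le_length hjb]
    have hdrop2 : t.drop (t.length - j) = a.drop (a.length - j) := by
      rw [show t.length - j = b.length + (a.length - j) + 1 by omega, ht, List.drop_append,
        List.drop_eq_nil_of_le (by omega : b.length ≤ b.length + (a.length - j) + 1),
        List.nil_append,
        show b.length + (a.length - j) + 1 - b.length = (a.length - j) + 1 by omega]
      simp
    refine ⟨by omega, ?_⟩
    rw [List.suffix_iff_eq_drop, show (b.take j).length = j by rw [List.length_take]; omega]
    exact (hdrop2.symm.trans (hdrop.trans htake)).symm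
  · rintro ⟨hjm, hsuf⟩
    have hjb : j ≤ b.length := by omega
    have htake : t.take j = b.take j := by
      rw [ht, List.take_append_of_le_length hjb]
    rw [htake]
    have hsub : a <:+ t := ⟨b ++ ['\x00'], by rw [ht]; simp⟩
    exact hsuf.trans hsub

lemma piOverlap_char (prev cur : String)
    (hp : pvDomStr prev = true) (hc : pvDomStr cur = true) :
    piOverlap prev cur =
      Nat.findGreatest (fun j => cur.toList.take j <:+ prev.toList)
        (min prev.toList.length cur.toList.length - 1) := by
  have ha := sep_free_of_dom hp
  have hb := sep_free_of_dom hc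
  set a := prev.toList with hA
  set b := cur.toList with hB
  set t := b ++ '\x00' :: a with ht
  have hlen : t.length = b.length + a.length + 1 := by
    rw [ht, List.length_append, List.length_cons]
    omega
  obtain ⟨hfin, hpi⟩ := buildPi_spec t (by omega)
  set mn := min a.length b.length with hmn
  have hF : mB t = Nat.findGreatest (fun j => b.take j <:+ a) mn := by
    unfold mB
    rw [findGreatest_congr _ (fun j => j ≤ mn ∧ b.take j <:+ a) _
      (fun j hj => border_char_sep a b ha hb j hj)]
    rw [findGreatest_shrink _ mn _ (by rw [← ht]; omega) (fun j hPj => hPj.1)]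
    apply findGreatest_congr
    intro j hj
    simp [hj]
  show (if (buildPi t).2 = mn ∧ (buildPi t).2 ≠ 0
      then (buildPi t).1.getD ((buildPi t).2 - 1) 0 else (buildPi t).2)
    = Nat.findGreatest (fun j => b.take j <:+ a) (mn - 1)
  rw [hfin, hF]
  by_cases hcase : Nat.findGreatest (fun j => b.take j <:+ a) mn = mn ∧
      Nat.findGreatest (fun j => b.take j <:+ a) mn ≠ 0
  · rw [if_pos hcase]
    obtain ⟨hceq, hcne⟩ := hcase
    have hPmn : b.take mn <:+ a := by
      have := (Nat.findGreatest_eq_iff.1 hceq).2.1 (by omega)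
      simpa using this
    rw [hceq, hpi (mn - 1) (by omega), show mn - 1 + 1 = mn by omega]
    have htmn : t.take mn = b.take mn := by
      rw [ht, List.take_append_of_le_length (by omega)]
    rw [htmn]
    have hlmn : (b.take mn).length = mn := by rw [List.length_take]; omega
    unfold mB
    rw [hlmn]
    apply findGreatest_congr
    intro j hj
    rw [List.take_take, Nat.min_eq_left (by omega)]
    constructor
    · intro h
      exact h.trans hPmn
    · intro h
      exact suffix_of_suffix_le h hPmn
        (by rw [List.length_take, List.length_take]; omega)
  · rw [if_neg hcase]
    rcases Nat.eq_zero_or_pos mn with h0 | hposn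
    · rw [h0]
    · rw [show mn = (mn - 1) + 1 by omega, Nat.findGreatest_succ]
      by_cases hPb : b.take ((mn - 1) + 1) <:+ a
      · exfalso
        apply hcase
        rw [show mn = (mn - 1) + 1 by omega, Nat.findGreatest_succ, if_pos hPb]
        exact ⟨rfl, by omega⟩
      · rw [if_neg hPb, Nat.add_sub_cancel]

-- ---- A-side characterisation ----
lemma foldlast_findGreatest (C : Int → Prop) [DecidablePred C] (N : Nat) :
    (PySem.List.pyRange 1 (N : Int)).foldl (fun o i => if C i then i else o) 0
      = ((Nat.findGreatest (fun j => C (j : Int)) (N - 1) : Nat) : Int) := by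
  induction N with
  | zero => simp [PySem.List.pyRange]
  | succ k ih =>
    match k, ih with
    | 0, _ => simp [show ((1:Nat):Int) = 1 by norm_num, PySem.List.pyRange]
    | k + 1, ih =>
      have hstep : ((k + 2 : Nat) : Int) = ((k + 1 : Nat) : Int) + 1 := by push_cast; ring
      rw [hstep, PySem.List.pyRange_one_succ_right (by push_cast; omega), List.foldl_append,
        ih, List.foldl_cons, List.foldl_nil,
        show (k + 2) - 1 = (k + 1 - 1) + 1 from rfl, Nat.findGreatest_succ]
      by_cases hc : C ((k + 1 : Nat) : Int)
      · rw [if_pos hc, if_pos (by simpa using hc)]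
        push_cast
        omega
      · rw [if_neg hc, if_neg (by simpa using hc)]

lemma count_overlap_char (prev cur : String) :
    count_overlap prev cur =
      ((Nat.findGreatest (fun j => cur.toList.take j <:+ prev.toList)
        (min prev.toList.length cur.toList.length - 1) : Nat) : Int) := by
  unfold count_overlap
  have hmin : min (PySem.Str.len prev) (PySem.Str.len cur)
      = ((min prev.toList.length cur.toList.length : Nat) : Int) := by
    simp [pysem, Nat.cast_min]
  rw [hmin, foldlast_findGreatest]
  congr 1
  apply findGreatest_congr
  intro j hj
  have hslice : (PySem.Str.slice cur none (some ((j : Nat) : Int))).toList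
      = cur.toList.take j := by
    rw [PySem.Str.toList_slice, PySem.Chars.slice_eq_listSlice,
      PySem.List.slice_to_natCast]
  rw [PySem.Str.endswith_eq, PySem.Chars.endswith_iff, hslice]

lemma count_overlap_eq_piOverlap (prev cur : String)
    (hp : pvDomStr prev = true) (hc : pvDomStr cur = true) :
    count_overlap prev cur = ((piOverlap prev cur : Nat) : Int) := by
  rw [count_overlap_char, piOverlap_char prev cur hp hc]

-- ---- A as a fold over consecutive pairs (index bookkeeping) ----
lemma pyGet?_of_nonneg {α : Type} (xs : List α) (i : Int) (h0 : 0 ≤ i) :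
    PySem.List.pyGet? xs i = xs[i.toNat]? := by
  unfold PySem.List.pyGet? PySem.List.pyIdx?
  split_ifs with h1
  · simp
  · rw [Option.bind_none, eq_comm, List.getElem?_eq_none_iff]
    omega

lemma zip_tail_append (xs : List String) (y : String) (h : xs ≠ []) :
    (xs ++ [y]).zip ((xs ++ [y]).tail) = xs.zip xs.tail ++ [(xs.getLast h, y)] := by
  induction xs with
  | nil => exact absurd rfl h
  | cons a t ih =>
    cases t with
    | nil => simp
    | cons b t2 =>
      simp only [List.cons_append, List.tail_cons, List.zip_cons_cons] at *
      rw [ih (by simp)]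
      simp [List.getLast_cons]

lemma A_fold_pairs (p : String) (rest : List String) :
    (PySem.List.pyRange 1 (((p :: rest).length : Nat) : Int)).foldl
      (fun res i =>
        match PySem.List.pyGet? (p :: rest) i, PySem.List.pyGet? (p :: rest) (i - 1) with
        | some cur, some prev => res ++ PySem.Str.slice cur (some (count_overlap prev cur)) none
        | _, _ => res) p
    = ((p :: rest).zip rest).foldl
        (fun res pc => res ++ PySem.Str.slice pc.2 (some (count_overlap pc.1 pc.2)) none) p := by
  induction rest using List.reverseRecOn with
  | nil => simp [PySem.List.pyRange]
  | append_singleton rest' y ih =>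
    have hxs : p :: (rest' ++ [y]) = (p :: rest') ++ [y] := rfl
    have hne : (p :: rest') ≠ [] := by simp
    have hlen : (((p :: (rest' ++ [y])).length : Nat) : Int)
        = (((p :: rest').length : Nat) : Int) + 1 := by
      simp
    rw [hlen, PySem.List.pyRange_one_succ_right (by simp), List.foldl_append,
      List.foldl_cons, List.foldl_nil]
    have hcongr : ∀ (acc : String), ∀ i ∈ PySem.List.pyRange 1 (((p :: rest').length : Nat) : Int),
        (fun res i =>
          match PySem.List.pyGet? (p :: (rest' ++ [y])) i,
                PySem.List.pyGet? (p :: (rest' ++ [y])) (i - 1) with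
          | some cur, some prev => res ++ PySem.Str.slice cur (some (count_overlap prev cur)) none
          | _, _ => res) acc i
        = (fun res i =>
          match PySem.List.pyGet? (p :: rest') i, PySem.List.pyGet? (p :: rest') (i - 1) with
          | some cur, some prev => res ++ PySem.Str.slice cur (some (count_overlap prev cur)) none
          | _, _ => res) acc i := by
      intro acc i hi
      rw [PySem.List.mem_pyRange_one] at hi
      have h1 : PySem.List.pyGet? (p :: (rest' ++ [y])) i = PySem.List.pyGet? (p :: rest') i := by
        rw [pyGet?_of_nonneg _ i (by omega), pyGet?_of_nonneg _ i (by omega), hxs,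
          List.getElem?_append_left (by omega)]
      have h2 : PySem.List.pyGet? (p :: (rest' ++ [y])) (i - 1)
          = PySem.List.pyGet? (p :: rest') (i - 1) := by
        rw [pyGet?_of_nonneg _ (i - 1) (by omega), pyGet?_of_nonneg _ (i - 1) (by omega), hxs,
          List.getElem?_append_left (by omega)]
      simp only [h1, h2]
    rw [PySem.List.foldl_congr_mem _ _ _ _ hcongr, ih]
    have hzip : (p :: (rest' ++ [y])).zip (rest' ++ [y])
        = (p :: rest').zip rest' ++ [((p :: rest').getLast hne, y)] := by
      have := zip_tail_append (p :: rest') y hne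
      simpa using this
    rw [hzip, List.foldl_append, List.foldl_cons, List.foldl_nil]
    have hy : PySem.List.pyGet? (p :: (rest' ++ [y])) (((p :: rest').length : Nat) : Int)
        = some y := by
      rw [pyGet?_of_nonneg _ _ (by positivity), Int.toNat_natCast, hxs,
        List.getElem?_append_right (by simp)]
      simp
    have hpos : 1 ≤ (p :: rest').length := by simp
    have hlast : PySem.List.pyGet? (p :: (rest' ++ [y])) ((((p :: rest').length : Nat) : Int) - 1)
        = some ((p :: rest').getLast hne) := by
      have hn1 : ((((p :: rest').length : Nat) : Int) - 1).toNat = (p :: rest').length - 1 := by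
        omega
      rw [pyGet?_of_nonneg _ _ (by omega), hn1, hxs,
        List.getElem?_append_left (by omega),
        List.getLast_eq_getElem hne, List.getElem?_eq_getElem (by omega)]
    simp only [hy, hlast]

lemma A_eq_pairs (p : String) (rest : List String) :
    into_string (p :: rest)
      = ((p :: rest).zip rest).foldl
          (fun res pc => res ++ PySem.Str.slice pc.2 (some (count_overlap pc.1 pc.2)) none) p := by
  have h0 : PySem.List.pyGet? (p :: rest) 0 = some p := by
    rw [pyGet?_of_nonneg _ _ le_rfl]; rfl
  unfold into_string
  rw [h0]
  have := A_fold_pairs p rest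
  simpa using this

lemma foldl_append_toList (l : List String) (init : String) :
    (l.foldl (· ++ ·) init).toList = init.toList ++ (l.map String.toList).flatten := by
  induction l generalizing init with
  | nil => simp
  | cons x t ih => simp [ih, String.toList_append]

lemma join_nil_sep (ls : List (List Char)) : PySem.Chars.join [] ls = ls.flatten := by
  induction ls with
  | nil => rfl
  | cons a t ih =>
    cases t with
    | nil => simp [PySem.Chars.join, List.intercalate]
    | cons b t2 => rw [PySem.Chars.join_cons_cons]; simp_all

-- ===== VERDICT (by name: the statement is the Claim_ definition above) =====
theorem into_string_spec : Claim_equal_into_string := by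
  intro path hdom hpre
  unfold Spec_into_string
  cases path with
  | nil => exact absurd rfl hpre
  | cons p rest =>
    rw [A_eq_pairs]
    show _ = into_string_alt (p :: rest)
    unfold into_string_alt
    have hdom' : ∀ s ∈ p :: rest, pvDomStr s = true := by
      intro s hs
      exact (List.all_eq_true.mp hdom) _ hs
    have hpair : ∀ acc : String, ∀ pc ∈ (p :: rest).zip rest,
        acc ++ PySem.Str.slice pc.2 (some (count_overlap pc.1 pc.2)) none
          = acc ++ PySem.Str.slice pc.2 (some ((piOverlap pc.1 pc.2 : Nat) : Int)) none := by
      intro acc pc hm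
      obtain ⟨h1, h2⟩ := List.of_mem_zip hm
      rw [count_overlap_eq_piOverlap pc.1 pc.2 (hdom' _ h1) (hdom' _ (List.mem_cons_of_mem _ h2))]
    rw [PySem.List.foldl_congr_mem _ _ _ _ hpair]
    rw [← String.toList_inj, PySem.Str.toList_join, List.map_cons,
      show "".toList = ([] : List Char) from rfl, join_nil_sep,
      List.flatten_cons,
      ← List.foldl_map, foldl_append_toList]
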